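-- pv_equiv track=rewrite | github.com/JohnTheTripper/moviegoer-prototype | scene_cluster_io.py | get_shot_ids
-- ===== SOURCE A (Python) =====
-- def get_shot_ids(frame_choice, hac_labels):
--     shot_id = 0
--     shot_id_list = []
--     prev_frame = 1000
--
--     for frame_file, cluster in zip(frame_choice, hac_labels):
--         if cluster != prev_frame and prev_frame != 1000:
--             shot_id += 1
--         shot_id_list.append(shot_id)
--         prev_frame = cluster
--
--     return shot_id_list
-- ===== SOURCE B (Python) =====
-- def _runs(labels):
--     """Run-length encode labels into (value, count) pairs."""
--     if not labels:
--         return []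
--     runs = []
--     v, k = labels[0], 1
--     for c in labels[1:]:
--         if c == v:
--             k += 1
--         else:
--             runs.append((v, k))
--             v, k = c, 1
--     runs.append((v, k))
--     return runs
--
-- def get_shot_ids(frame_choice, hac_labels):
--     labels = [c for _, c in zip(frame_choice, hac_labels)]
--     out = []
--     sid = 0
--     prev = None
--     for val, count in _runs(labels):
--         if prev is not None and prev != 1000:
--             sid += 1
--         out.extend([sid] * count)
--         prev = val
--     return out
-- ===== Notes on version B (the rewrite author's own statement) =====
-- stated objective: alternative
-- what changed: B replaces A's fused per-element counter loop with a run-length encoding pass that compresses the labels into (value, count) runs, then emits one constant id block per run, bumping the id between runs unless the previous run's value is 1000.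
import Mathlib
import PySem

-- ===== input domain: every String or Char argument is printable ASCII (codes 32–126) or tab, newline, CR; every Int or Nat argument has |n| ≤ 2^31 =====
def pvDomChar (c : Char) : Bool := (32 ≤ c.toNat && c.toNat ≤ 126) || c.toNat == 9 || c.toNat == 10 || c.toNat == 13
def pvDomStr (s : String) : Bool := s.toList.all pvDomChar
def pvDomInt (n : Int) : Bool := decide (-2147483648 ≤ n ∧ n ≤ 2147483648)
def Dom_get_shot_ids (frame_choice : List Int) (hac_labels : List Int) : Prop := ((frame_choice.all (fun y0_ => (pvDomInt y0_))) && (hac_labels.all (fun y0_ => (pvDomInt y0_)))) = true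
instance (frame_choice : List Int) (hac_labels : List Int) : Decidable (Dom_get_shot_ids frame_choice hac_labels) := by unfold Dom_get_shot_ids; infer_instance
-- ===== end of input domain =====

-- B re-solves the task by run-length encoding the labels and emitting one id block per run
-- (alternative algorithm, same O(n) cost); return values proved equal on all inputs.

-- ===== PORT A =====
-- the for-loop over zip(frame_choice, hac_labels) with state (shot_id, prev_frame)
def getShotIdsLoop (shot_id : Int) (prev_frame : Int) : List (Int × Int) → List Int
  | [] => []
  | (_, cluster) :: rest =>
      let s' := if cluster ≠ prev_frame ∧ prev_frame ≠ 1000 then shot_id + 1 else shot_id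
      s' :: getShotIdsLoop s' cluster rest

def get_shot_ids (frame_choice : List Int) (hac_labels : List Int) : List Int :=
  getShotIdsLoop 0 1000 (frame_choice.zip hac_labels)

-- ===== PORT B =====
-- _runs: run-length encode; rleAux carries the current run (v, k) like Source B's (v, k) pair
def rleAux (v : Int) (k : Nat) : List Int → List (Int × Nat)
  | [] => [(v, k)]
  | c :: rest => if c = v then rleAux v (k + 1) rest else (v, k) :: rleAux c 1 rest

def runsOf : List Int → List (Int × Nat)
  | [] => []
  | c :: rest => rleAux c 1 rest

-- Source B's second loop: one block of ids per run, prev = None initially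
def expandRuns (sid : Int) (prev : Option Int) : List (Int × Nat) → List Int
  | [] => []
  | (v, k) :: rest =>
      let sid' := if prev.isSome ∧ prev ≠ some 1000 then sid + 1 else sid
      List.replicate k sid' ++ expandRuns sid' (some v) rest

def get_shot_ids_alt (frame_choice : List Int) (hac_labels : List Int) : List Int :=
  expandRuns 0 none (runsOf ((frame_choice.zip hac_labels).map Prod.snd))

-- ===== PRECONDITION & SPEC =====
def Spec_get_shot_ids (frame_choice : List Int) (hac_labels : List Int) (out : List Int) : Prop := out = get_shot_ids_alt frame_choice hac_labels
instance (frame_choice : List Int) (hac_labels : List Int) (out : List Int) : Decidable (Spec_get_shot_ids frame_choice hac_labels out) := by unfold Spec_get_shot_ids; infer_instance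

-- ===== CLAIM (what is proved, stated in full; the proofs are below) =====
def Claim_equal_get_shot_ids : Prop := ∀ (frame_choice : List Int) (hac_labels : List Int), Dom_get_shot_ids frame_choice hac_labels → Spec_get_shot_ids frame_choice hac_labels (get_shot_ids frame_choice hac_labels)

-- ===== LEMMAS AND PROOFS =====

-- A's loop seen over the labels only (it ignores the first zip component)
def loopLabels (s : Int) (p : Int) : List Int → List Int
  | [] => []
  | c :: rest =>
      let s' := if c ≠ p ∧ p ≠ 1000 then s + 1 else s
      s' :: loopLabels s' c rest

theorem getShotIdsLoop_eq_loopLabels (ps : List (Int × Int)) :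
    ∀ (s p : Int), getShotIdsLoop s p ps = loopLabels s p (ps.map Prod.snd) := by
  induction ps with
  | nil => intro s p; rfl
  | cons hd tl ih =>
    intro s p
    obtain ⟨f, c⟩ := hd
    simp only [getShotIdsLoop, loopLabels, List.map_cons, ih]

-- rleAux produces the current run extended by the leading equal elements, then the rest's runs
theorem rleAux_spec (l : List Int) :
    ∀ (v : Int) (k : Nat),
      rleAux v k l
        = (v, k + (l.takeWhile (fun c => c == v)).length)
            :: runsOf (l.dropWhile (fun c => c == v)) := by
  induction l with
  | nil => intro v k; simp [rleAux, runsOf]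
  | cons c rest ih =>
    intro v k
    by_cases h : c = v
    · subst h
      simp only [rleAux, ih, List.takeWhile_cons, List.dropWhile_cons,
        BEq.rfl, if_pos, List.length_cons]
      have h2 : k + 1 + (rest.takeWhile (fun x => x == c)).length
          = k + ((rest.takeWhile (fun x => x == c)).length + 1) := by omega
      rw [h2]
    · have hb : (c == v) = false := by simp [h]
      simp [rleAux, h, hb, runsOf]

-- the takeWhile prefix for (== v) is a block of v's
theorem takeWhile_eq_replicate (v : Int) (l : List Int) :
    l.takeWhile (fun c => c == v)
      = List.replicate (l.takeWhile (fun c => c == v)).length v := by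
  induction l with
  | nil => rfl
  | cons c rest ih =>
    by_cases h : c = v
    · subst h
      simp only [List.takeWhile_cons, BEq.rfl, if_pos, List.length_cons,
        List.replicate_succ]
      exact congrArg _ ih
    · have hb : (c == v) = false := by simp [h]
      simp [hb]

-- after dropWhile (== v), the head (if any) differs from v
theorem head_dropWhile_ne (v : Int) (l : List Int) :
    ∀ c rest, l.dropWhile (fun c => c == v) = c :: rest → c ≠ v := by
  induction l with
  | nil => intro c rest h; cases h
  | cons a tl ih =>
    intro c rest h
    by_cases ha : a = v
    · subst ha
      rw [List.dropWhile_cons_of_pos (by simp)] at h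
      exact ih c rest h
    · rw [List.dropWhile_cons_of_neg (by simp [ha])] at h
      cases h
      exact ha

-- A's loop over a block of equal labels emits the current id unchanged
theorem loop_run (j : Nat) :
    ∀ (s v : Int) (rest : List Int),
      loopLabels s v (List.replicate j v ++ rest)
        = List.replicate j s ++ loopLabels s v rest := by
  induction j with
  | zero => intro s v rest; rfl
  | succ n ih =>
    intro s v rest
    simp only [List.replicate_succ, List.cons_append, loopLabels]
    have hc : ¬ (v ≠ v ∧ v ≠ (1000 : Int)) := by simp
    rw [if_neg hc]
    exact congrArg _ (ih s v rest)

-- core correspondence: the fused loop equals run-length encode + expand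
theorem loop_eq_runs (l : List Int) (s : Int) (pr : Option Int)
    (H : ∀ p c rest, pr = some p → l = c :: rest → c ≠ p ∨ p = 1000) :
    loopLabels s (pr.getD 1000) l = expandRuns s pr (runsOf l) := by
  match l with
  | [] => cases pr <;> rfl
  | c :: rest =>
    have hA : runsOf (c :: rest)
        = (c, 1 + (rest.takeWhile (fun x => x == c)).length)
            :: runsOf (rest.dropWhile (fun x => x == c)) := by
      simp only [runsOf]; exact rleAux_spec rest c 1
    set j := (rest.takeWhile (fun x => x == c)).length with hj
    have hsid : (if c ≠ pr.getD 1000 ∧ pr.getD 1000 ≠ 1000 then s + 1 else s)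
        = (if pr.isSome ∧ pr ≠ some 1000 then s + 1 else s) := by
      cases pr with
      | none => simp
      | some p =>
        rcases H p c rest rfl rfl with hne | h1000
        · simp only [Option.getD_some, Option.isSome_some]
          by_cases hp : p = (1000 : Int)
          · simp [hp]
          · simp [hp, hne]
        · simp [h1000]
    set sid' := if pr.isSome ∧ pr ≠ some 1000 then s + 1 else s with hsd
    have hsplit : rest = List.replicate j c ++ rest.dropWhile (fun x => x == c) := by
      conv_lhs => rw [← List.takeWhile_append_dropWhile (p := fun x => x == c) (l := rest)]
      rw [takeWhile_eq_replicate c rest]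
    have hIH : loopLabels sid' c (rest.dropWhile (fun x => x == c))
        = expandRuns sid' (some c) (runsOf (rest.dropWhile (fun x => x == c))) := by
      have := loop_eq_runs (rest.dropWhile (fun x => x == c)) sid' (some c)
        (by
          intro p d tl hp hd
          cases hp
          exact Or.inl (head_dropWhile_ne c rest d tl hd))
      simpa using this
    calc loopLabels s (pr.getD 1000) (c :: rest)
        = sid' :: loopLabels sid' c rest := by
          simp only [loopLabels, hsid]
      _ = sid' :: (List.replicate j sid' ++ loopLabels sid' c (rest.dropWhile (fun x => x == c))) := by
          rw [congrArg (loopLabels sid' c) hsplit, loop_run]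
      _ = List.replicate (1 + j) sid' ++ expandRuns sid' (some c) (runsOf (rest.dropWhile (fun x => x == c))) := by
          rw [hIH]; simp [List.replicate_succ, Nat.add_comm 1 j]
      _ = expandRuns s pr (runsOf (c :: rest)) := by
          rw [hA]; simp only [expandRuns, ← hsd]
termination_by l.length
decreasing_by
  have := List.length_dropWhile_le (p := fun x => x == c) (l := rest)
  simp only [List.length_cons]
  omega

-- ===== VERDICT (by name: the statement is the Claim_ definition above) =====
theorem get_shot_ids_spec : Claim_equal_get_shot_ids := by
  intro fc hl _
  unfold Spec_get_shot_ids get_shot_ids get_shot_ids_alt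
  rw [getShotIdsLoop_eq_loopLabels]
  exact loop_eq_runs _ 0 none (by intro p c rest hp _; cases hp)
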